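-- pv_equiv track=rewrite | github.com/JKottonen/Tiral-k2022-assignments | viikko-2/onecharRec.py | count
-- ===== SOURCE A (Python) =====
-- def recSum(n):
--     if n == 0:
--         return 0
--     else:
--         return recSum(n-1) + n
--
-- def count(s):
--     sum = 0
--     prev = s[0]
--     prevcount = 0
--     index = 0
--     for i in s:
--         index += 1
--         if( prev == i ):
--             prevcount += 1
--         else:
--             sum += recSum(prevcount)
--             prev = i
--             prevcount = 1
--     sum += recSum(prevcount)
--     return sum
-- ===== SOURCE B (Python) =====
-- def count(s):
--     total = 0
--     streak = 0
--     prev = None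
--     for c in s:
--         streak = streak + 1 if c == prev else 1
--         prev = c
--         total += streak
--     return total
-- ===== Notes on version B (the rewrite author's own statement) =====
-- stated objective: simpler
-- what changed: Replaces the recursive triangular-sum helper and end-of-run accounting with a single pass that keeps the current streak length and adds it to the total at every character.
-- outside the precondition, e.g. on count(''): A raises IndexError, B returns 0
import Mathlib
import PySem

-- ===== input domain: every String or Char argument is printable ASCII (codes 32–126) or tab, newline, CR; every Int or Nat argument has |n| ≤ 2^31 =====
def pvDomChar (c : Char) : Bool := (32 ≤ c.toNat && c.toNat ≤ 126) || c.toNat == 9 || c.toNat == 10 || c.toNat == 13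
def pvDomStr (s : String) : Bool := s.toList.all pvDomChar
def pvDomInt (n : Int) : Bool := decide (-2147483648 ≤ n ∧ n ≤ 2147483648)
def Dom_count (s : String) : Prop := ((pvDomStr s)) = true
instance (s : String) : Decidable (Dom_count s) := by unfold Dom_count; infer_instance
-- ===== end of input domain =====

-- B replaces the recursive run-sum helper with a streak counter added at every character (objective: simpler).

-- ===== PORT A =====
-- Python recSum diverges for negative n; A only calls it with n ≥ 0, where this is exact.
def recSum (n : Int) : Int :=
  if n ≤ 0 then 0 else recSum (n - 1) + n
termination_by n.toNat
decreasing_by omega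

def count (s : String) : Int :=
  match PySem.Str.pyGet? s 0 with
  | none => 0  -- IndexError in Python; excluded by Pre_count
  | some p0 =>
    let st := s.toList.foldl
      (fun (st : Int × Char × Int × Int) i =>
        let (sum, prev, prevcount, index) := st
        let index := index + 1
        if prev == i then (sum, prev, prevcount + 1, index)
        else (sum + recSum prevcount, i, (1 : Int), index))
      ((0 : Int), p0, (0 : Int), (0 : Int))
    st.1 + recSum st.2.2.1

-- ===== PORT B =====
def count_alt (s : String) : Int :=
  (s.toList.foldl
    (fun (st : Int × Int × Option Char) c =>
      let (total, streak, prev) := st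
      let streak := if some c == prev then streak + 1 else 1
      (total + streak, streak, some c))
    ((0 : Int), (0 : Int), (none : Option Char))).1

-- ===== PRECONDITION & SPEC =====
-- Pre_ excludes only the empty string, on which Python A raises IndexError at s[0].
def Pre_count (s : String) : Prop := s ≠ ""
instance (s : String) : Decidable (Pre_count s) := by unfold Pre_count; infer_instance
def pvWitness_count : String := "aab"

def Spec_count (s : String) (out : Int) : Prop := out = count_alt s
instance (s : String) (out : Int) : Decidable (Spec_count s out) := by unfold Spec_count; infer_instance

-- ===== CLAIM (what is proved, stated in full; the proofs are below) =====
def Claim_equal_count : Prop := ∀ (s : String), Dom_count s → Pre_count s → Spec_count s (count s)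

-- ===== LEMMAS AND PROOFS =====

theorem recSum_one : recSum (1 : Int) = 1 := by
  rw [recSum, recSum]; norm_num

theorem recSum_succ (k : Int) (hk : 0 ≤ k) : recSum (k + 1) = recSum k + (k + 1) := by
  rw [recSum]
  simp only [show ¬ (k + 1 ≤ 0) by omega, if_false]
  ring_nf

-- Loop invariant: A's fold from (a, p, k, idx) and B's fold from (a + recSum k, k, some p) agree on the final answer.
theorem loop_eq (l : List Char) : ∀ (a : Int) (p : Char) (k : Int) (idx : Int), 0 ≤ k →
    (let st := l.foldl
        (fun (st : Int × Char × Int × Int) i =>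
          let (sum, prev, prevcount, index) := st
          let index := index + 1
          if prev == i then (sum, prev, prevcount + 1, index)
          else (sum + recSum prevcount, i, (1 : Int), index))
        (a, p, k, idx)
     st.1 + recSum st.2.2.1)
    =
    (l.foldl
      (fun (st : Int × Int × Option Char) c =>
        let (total, streak, prev) := st
        let streak := if some c == prev then streak + 1 else 1
        (total + streak, streak, some c))
      (a + recSum k, k, some p)).1 := by
  induction l with
  | nil => intro a p k idx hk; simp
  | cons c l ih =>
    intro a p k idx hk
    by_cases h : p = c
    · subst h
      simp only [List.foldl_cons, beq_self_eq_true, if_true]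
      have := ih a p (k + 1) (idx + 1) (by omega)
      rw [recSum_succ k hk] at this
      simpa [add_assoc] using this
    · have h1 : (p == c) = false := by simp [h]
      have h2 : (some c == some p) = false := by simp [Ne.symm h]
      simp only [List.foldl_cons, h1, h2]
      have := ih (a + recSum k) c 1 (idx + 1) (by omega)
      rw [recSum_one] at this
      simpa using this

-- ===== VERDICT (by name: the statement is the Claim_ definition above) =====
theorem count_spec : Claim_equal_count := by
  unfold Claim_equal_count
  intro s _ hpre
  unfold Spec_count count count_alt
  have hne : s.toList ≠ [] := by
    intro h
    exact hpre (String.toList_eq_nil_iff.mp h)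
  obtain ⟨c0, rest, hl⟩ := List.exists_cons_of_ne_nil hne
  have hget : PySem.Str.pyGet? s 0 = some c0 := by
    simp [PySem.Str.pyGet?, hl]
  rw [hget, hl]
  simp only [List.foldl_cons, beq_self_eq_true, if_true]
  have := loop_eq rest 0 c0 1 1 (by omega)
  rw [recSum_one] at this
  simpa using this
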